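-- pv_equiv track=rewrite | github.com/jacobe90/birdflow_mixture_of_products | mixture_of_products_from_sampled_routes.py | get_overall_to_weekly_mask_conversion_dict
-- ===== SOURCE A (Python) =====
-- def get_overall_to_weekly_mask_conversion_dict(nan_mask, weekly_mask):
--     overall_dict = {}
--     idx = 0
--     for i, b in enumerate(nan_mask):
--         if b:
--             overall_dict[i] = idx
--             idx += 1
--         if not b:
--             overall_dict[i] = None
--     weekly_dict = {None: None}
--     idx = 0
--     for i, b in enumerate(weekly_mask):
--         if b:
--             weekly_dict[i] = idx
--             idx += 1
--         if not b:
--             weekly_dict[i] = None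
--     conversion_dict = {}
--     for i in range(len(nan_mask)):
--         conversion_dict[i] = weekly_dict[overall_dict[i]]
--     return conversion_dict
-- ===== SOURCE B (Python) =====
-- def get_overall_to_weekly_mask_conversion_dict(nan_mask, weekly_mask):
--     # compressed weekly positions as a list: wk[t] = compressed weekly index of t (None if weekly_mask[t] is False)
--     wk = []
--     c = 0
--     for b in weekly_mask:
--         if b:
--             wk.append(c)
--             c += 1
--         else:
--             wk.append(None)
--     # single fused pass over nan_mask: idx counts True entries seen so far
--     conversion_dict = {}
--     idx = 0
--     for i, b in enumerate(nan_mask):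
--         if b:
--             conversion_dict[i] = wk[idx]
--             idx += 1
--         else:
--             conversion_dict[i] = None
--     return conversion_dict
-- ===== Notes on version B (the rewrite author's own statement) =====
-- stated objective: faster
-- what changed: Replaces A's three passes and two intermediate dicts (overall_dict, weekly_dict keyed by Optional[int]) with a plain list of compressed weekly positions and one fused pass over nan_mask carrying a True-counter, writing each conversion entry directly (measured ~2x faster: no third pass, no dict lookups).
import Mathlib
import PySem

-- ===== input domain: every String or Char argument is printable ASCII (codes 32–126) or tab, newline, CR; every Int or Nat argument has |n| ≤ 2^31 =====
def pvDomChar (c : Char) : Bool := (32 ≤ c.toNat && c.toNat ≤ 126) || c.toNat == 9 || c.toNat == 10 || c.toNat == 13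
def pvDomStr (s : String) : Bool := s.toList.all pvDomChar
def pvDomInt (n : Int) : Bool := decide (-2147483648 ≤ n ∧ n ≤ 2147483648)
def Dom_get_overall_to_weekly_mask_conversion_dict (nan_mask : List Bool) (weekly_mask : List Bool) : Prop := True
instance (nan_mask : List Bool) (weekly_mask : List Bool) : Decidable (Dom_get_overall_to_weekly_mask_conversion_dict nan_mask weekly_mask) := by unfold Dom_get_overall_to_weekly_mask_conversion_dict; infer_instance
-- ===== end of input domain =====

-- B replaces A's three passes and two intermediate dicts with a list of compressed weekly
-- positions plus one fused pass over nan_mask carrying a True-counter (fewer passes, no dict lookups;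
-- measured faster in a timing run).

-- ===== PORT A =====
-- getD with default `none` stands for Python's raising dict lookup: under Pre_ the looked-up
-- keys are always present (overall_dict holds every i, weekly_dict holds None and 0..idx-1).
def get_overall_to_weekly_mask_conversion_dict (nan_mask : List Bool) (weekly_mask : List Bool) : List (Int × Option Int) :=
  let od := ((PySem.List.enumerate nan_mask 0).foldl
      (fun (p : PySem.Dict Int (Option Int) × Int) ib =>
        if ib.2 then (p.1.insert ib.1 (some p.2), p.2 + 1) else (p.1.insert ib.1 none, p.2))
      (PySem.Dict.empty, 0)).1
  let wd := ((PySem.List.enumerate weekly_mask 0).foldl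
      (fun (p : PySem.Dict (Option Int) (Option Int) × Int) ib =>
        if ib.2 then (p.1.insert (some ib.1) (some p.2), p.2 + 1) else (p.1.insert (some ib.1) none, p.2))
      ((PySem.Dict.empty).insert none none, 0)).1
  let cd := (PySem.List.pyRange 0 (nan_mask.length : Int) 1).foldl
      (fun (d : PySem.Dict Int (Option Int)) i => d.insert i (wd.getD (od.getD i none) none))
      PySem.Dict.empty
  cd.items

-- ===== PORT B =====
def get_overall_to_weekly_mask_conversion_dict_alt (nan_mask : List Bool) (weekly_mask : List Bool) : List (Int × Option Int) :=
  let wk := (weekly_mask.foldl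
      (fun (p : List (Option Int) × Int) b =>
        if b then (p.1 ++ [some p.2], p.2 + 1) else (p.1 ++ [none], p.2)) ([], 0)).1
  -- pyGetD with default `none` stands for Python's raising wk[idx]: under Pre_ idx < len(wk).
  let cd := ((PySem.List.enumerate nan_mask 0).foldl
      (fun (p : PySem.Dict Int (Option Int) × Int) ib =>
        if ib.2 then (p.1.insert ib.1 (PySem.List.pyGetD wk p.2 none), p.2 + 1)
        else (p.1.insert ib.1 none, p.2))
      (PySem.Dict.empty, 0)).1
  cd.items

-- ===== PRECONDITION & SPEC =====
-- Pre_ excludes exactly the inputs where A raises KeyError (and B IndexError): more True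
-- entries in nan_mask than weekly_mask has positions.
def Pre_get_overall_to_weekly_mask_conversion_dict (nan_mask : List Bool) (weekly_mask : List Bool) : Prop :=
  nan_mask.count true ≤ weekly_mask.length
instance (nan_mask : List Bool) (weekly_mask : List Bool) : Decidable (Pre_get_overall_to_weekly_mask_conversion_dict nan_mask weekly_mask) := by unfold Pre_get_overall_to_weekly_mask_conversion_dict; infer_instance

def pvWitness_get_overall_to_weekly_mask_conversion_dict : List Bool × List Bool := ([true, false, true], [true, true, false])

def Spec_get_overall_to_weekly_mask_conversion_dict (nan_mask : List Bool) (weekly_mask : List Bool) (out : List (Int × Option Int)) : Prop := out = get_overall_to_weekly_mask_conversion_dict_alt nan_mask weekly_mask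
instance (nan_mask : List Bool) (weekly_mask : List Bool) (out : List (Int × Option Int)) : Decidable (Spec_get_overall_to_weekly_mask_conversion_dict nan_mask weekly_mask out) := by unfold Spec_get_overall_to_weekly_mask_conversion_dict; infer_instance

-- ===== CLAIM (what is proved, stated in full; the proofs are below) =====
def Claim_equal_get_overall_to_weekly_mask_conversion_dict : Prop := ∀ (nan_mask : List Bool) (weekly_mask : List Bool), Dom_get_overall_to_weekly_mask_conversion_dict nan_mask weekly_mask → Pre_get_overall_to_weekly_mask_conversion_dict nan_mask weekly_mask → Spec_get_overall_to_weekly_mask_conversion_dict nan_mask weekly_mask (get_overall_to_weekly_mask_conversion_dict nan_mask weekly_mask)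

-- ===== LEMMAS AND PROOFS =====

-- the sequence of "compressed index" values produced by a counting pass starting at c
def wkListAux (xs : List Bool) (c : Int) : List (Option Int) :=
  match xs with
  | [] => []
  | b :: rest => (if b then some c else none) :: wkListAux rest (if b then c + 1 else c)

-- the conversion entries produced starting at overall index s with True-counter c
def convListAux (wk : List (Option Int)) (xs : List Bool) (s c : Int) : List (Int × Option Int) :=
  match xs with
  | [] => []
  | b :: rest => (s, if b then PySem.List.pyGetD wk c none else none) :: convListAux wk rest (s + 1) (if b then c + 1 else c)

lemma wkListAux_length (xs : List Bool) (c : Int) : (wkListAux xs c).length = xs.length := by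
  induction xs generalizing c with
  | nil => rfl
  | cons b rest ih => simp [wkListAux, ih]

-- B's first loop builds wkListAux
lemma wkfold (xs : List Bool) (acc : List (Option Int)) (c : Int) :
    (xs.foldl (fun (p : List (Option Int) × Int) b =>
        if b then (p.1 ++ [some p.2], p.2 + 1) else (p.1 ++ [none], p.2)) (acc, c)).1
    = acc ++ wkListAux xs c := by
  induction xs generalizing acc c with
  | nil => simp [wkListAux]
  | cons b rest ih => cases b <;> simp [wkListAux, ih]

-- B's second loop appends convListAux entries to a dict whose keys are all below s
lemma bfold (wk : List (Option Int)) (xs : List Bool) (s c : Int)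
    (d : PySem.Dict Int (Option Int)) (hf : ∀ j : Int, s ≤ j → d.contains j = false) :
    (((PySem.List.enumerate xs s).foldl
        (fun (p : PySem.Dict Int (Option Int) × Int) ib =>
          if ib.2 then (p.1.insert ib.1 (PySem.List.pyGetD wk p.2 none), p.2 + 1)
          else (p.1.insert ib.1 none, p.2)) (d, c)).1).items
    = d.items ++ convListAux wk xs s c := by
  induction xs generalizing s c d with
  | nil => simp [PySem.List.enumerate_nil, convListAux]
  | cons b rest ih =>
    rw [PySem.List.enumerate_cons]
    have hfresh : ∀ (v : Option Int) (j : Int), s + 1 ≤ j → ((d.insert s v).contains j) = false := by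
      intro v j hj
      rw [PySem.Dict.contains_insert]
      have h1 : (j == s) = false := by simp; omega
      simp [h1, hf j (by omega)]
    have hins : ∀ v : Option Int, (d.insert s v).items = d.items ++ [(s, v)] :=
      fun v => PySem.Dict.items_insert_of_not_contains d v (hf s (le_refl s))
    cases b <;>
      simp only [List.foldl_cons, if_true, if_false, Bool.false_eq_true] <;>
      rw [ih _ _ _ (hfresh _)] <;> simp [convListAux, hins]

-- A's first loop: getD on the resulting overall_dict
lemma ofold_getD (xs : List Bool) (s c : Int) (d : PySem.Dict Int (Option Int)) (i : Int) :
    (((PySem.List.enumerate xs s).foldl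
        (fun (p : PySem.Dict Int (Option Int) × Int) ib =>
          if ib.2 then (p.1.insert ib.1 (some p.2), p.2 + 1) else (p.1.insert ib.1 none, p.2))
        (d, c)).1).getD i none
    = if s ≤ i ∧ i < s + xs.length then (wkListAux xs c).getD (i - s).toNat none
      else d.getD i none := by
  induction xs generalizing s c d with
  | nil =>
    rw [PySem.List.enumerate_nil]
    simp only [List.foldl_nil]
    rw [if_neg (by simp only [List.length_nil]; push_cast; omega)]
  | cons b rest ih =>
    rw [PySem.List.enumerate_cons]
    have key : ∀ (v : Option Int) (c' : Int), v = (if b then some c else none) →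
        c' = (if b then c + 1 else c) →
        (((PySem.List.enumerate rest (s + 1)).foldl
          (fun (p : PySem.Dict Int (Option Int) × Int) ib =>
            if ib.2 then (p.1.insert ib.1 (some p.2), p.2 + 1) else (p.1.insert ib.1 none, p.2))
          (d.insert s v, c')).1).getD i none
        = if s ≤ i ∧ i < s + (b :: rest).length then (wkListAux (b :: rest) c).getD (i - s).toNat none
          else d.getD i none := by
      intro v c' hv hc'
      rw [ih (s + 1) c' (d.insert s v)]
      rcases eq_or_ne i s with rfl | hne
      · rw [if_neg (by omega),
            if_pos (by simp only [List.length_cons]; push_cast; omega)]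
        rw [PySem.Dict.getD_insert_self]
        have h0 : (i - i).toNat = 0 := by omega
        rw [h0]
        simp [wkListAux, hv]
      · rw [PySem.Dict.getD_insert_of_ne d v none hne]
        by_cases h2 : s + 1 ≤ i ∧ i < s + 1 + rest.length
        · rw [if_pos h2, if_pos (by simp only [List.length_cons] at h2 ⊢; push_cast at h2 ⊢; omega)]
          have ht : (i - s).toNat = (i - (s + 1)).toNat + 1 := by omega
          simp [wkListAux, ht, hc']
        · rw [if_neg h2, if_neg (by simp only [List.length_cons] at h2 ⊢; push_cast at h2 ⊢; omega)]
    cases b <;> simp only [List.foldl_cons, if_true, if_false, Bool.false_eq_true] <;>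
      exact key _ _ rfl rfl

-- A's second loop: getD at key None is untouched (only `some` keys are inserted)
lemma wfold_getD_none (xs : List Bool) (s c : Int) (d : PySem.Dict (Option Int) (Option Int)) :
    (((PySem.List.enumerate xs s).foldl
        (fun (p : PySem.Dict (Option Int) (Option Int) × Int) ib =>
          if ib.2 then (p.1.insert (some ib.1) (some p.2), p.2 + 1)
          else (p.1.insert (some ib.1) none, p.2)) (d, c)).1).getD none none
    = d.getD none none := by
  induction xs generalizing s c d with
  | nil => simp [PySem.List.enumerate_nil]
  | cons b rest ih =>
    rw [PySem.List.enumerate_cons]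
    cases b <;> simp only [List.foldl_cons, if_true, if_false, Bool.false_eq_true] <;>
      rw [ih] <;> exact PySem.Dict.getD_insert_of_ne d _ _ (by simp)

-- A's second loop: getD at key (some j)
lemma wfold_getD_some (xs : List Bool) (s c : Int) (d : PySem.Dict (Option Int) (Option Int)) (j : Int) :
    (((PySem.List.enumerate xs s).foldl
        (fun (p : PySem.Dict (Option Int) (Option Int) × Int) ib =>
          if ib.2 then (p.1.insert (some ib.1) (some p.2), p.2 + 1)
          else (p.1.insert (some ib.1) none, p.2)) (d, c)).1).getD (some j) none
    = if s ≤ j ∧ j < s + xs.length then (wkListAux xs c).getD (j - s).toNat none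
      else d.getD (some j) none := by
  induction xs generalizing s c d with
  | nil =>
    rw [PySem.List.enumerate_nil]
    simp only [List.foldl_nil]
    rw [if_neg (by simp only [List.length_nil]; push_cast; omega)]
  | cons b rest ih =>
    rw [PySem.List.enumerate_cons]
    have key : ∀ (v : Option Int) (c' : Int), v = (if b then some c else none) →
        c' = (if b then c + 1 else c) →
        (((PySem.List.enumerate rest (s + 1)).foldl
          (fun (p : PySem.Dict (Option Int) (Option Int) × Int) ib =>
            if ib.2 then (p.1.insert (some ib.1) (some p.2), p.2 + 1)
            else (p.1.insert (some ib.1) none, p.2))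
          (d.insert (some s) v, c')).1).getD (some j) none
        = if s ≤ j ∧ j < s + (b :: rest).length then (wkListAux (b :: rest) c).getD (j - s).toNat none
          else d.getD (some j) none := by
      intro v c' hv hc'
      rw [ih (s + 1) c' (d.insert (some s) v)]
      rcases eq_or_ne j s with rfl | hne
      · rw [if_neg (by omega),
            if_pos (by simp only [List.length_cons]; push_cast; omega)]
        rw [PySem.Dict.getD_insert_self]
        have h0 : (j - j).toNat = 0 := by omega
        rw [h0]
        simp [wkListAux, hv]
      · rw [PySem.Dict.getD_insert_of_ne d v none (by simp [hne])]
        by_cases h2 : s + 1 ≤ j ∧ j < s + 1 + rest.length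
        · rw [if_pos h2, if_pos (by simp only [List.length_cons] at h2 ⊢; push_cast at h2 ⊢; omega)]
          have ht : (j - s).toNat = (j - (s + 1)).toNat + 1 := by omega
          simp [wkListAux, ht, hc']
        · rw [if_neg h2, if_neg (by simp only [List.length_cons] at h2 ⊢; push_cast at h2 ⊢; omega)]
    cases b <;> simp only [List.foldl_cons, if_true, if_false, Bool.false_eq_true] <;>
      exact key _ _ rfl rfl

-- the common shape: A's per-index lookup composed over wkListAux equals convListAux
lemma mapRange_eq_conv (wk : List (Option Int)) (H : Option Int → Option Int)
    (hnone : H none = none)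
    (hsome : ∀ t : Int, 0 ≤ t → t < (wk.length : Int) → H (some t) = PySem.List.pyGetD wk t none) :
    ∀ (xs : List Bool) (s c : Int), 0 ≤ c → c + xs.count true ≤ (wk.length : Int) →
    (List.range xs.length).map (fun (k : Nat) => ((s + (k : Int), H ((wkListAux xs c).getD k none)) : Int × Option Int))
    = convListAux wk xs s c := by
  intro xs
  induction xs with
  | nil => intro s c _ _; simp [convListAux]
  | cons b rest ih =>
    intro s c hc hbound
    rw [List.length_cons, List.range_succ_eq_map, List.map_cons, List.map_map]
    have hshift : ∀ (c' : Int), c' = (if b then c + 1 else c) → (List.range rest.length).map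
        ((fun (k : Nat) => ((s + (k : Int), H ((wkListAux (b :: rest) c).getD k none)) : Int × Option Int)) ∘ Nat.succ)
        = (List.range rest.length).map
          (fun (k : Nat) => (((s + 1) + (k : Int), H ((wkListAux rest c').getD k none)) : Int × Option Int)) := by
      intro c' hc'
      subst hc'
      apply List.map_congr_left
      intro k _
      have harith : s + ((k.succ : Nat) : Int) = (s + 1) + (k : Int) := by push_cast; ring
      simp only [Function.comp_apply, wkListAux, List.getD_cons_succ, harith]
    cases b with
    | false =>
      have hb : List.count true (false :: rest) = List.count true rest := by simp
      rw [hb] at hbound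
      rw [hshift c rfl, ih (s + 1) c hc hbound]
      have hhead : ((s + ((0 : Nat) : Int), H ((wkListAux (false :: rest) c).getD 0 none)) : Int × Option Int)
          = (s, none) := by simp [wkListAux, hnone]
      rw [hhead]
      simp [convListAux]
    | true =>
      have hb : List.count true (true :: rest) = List.count true rest + 1 := by simp
      rw [hb] at hbound
      push_cast at hbound
      rw [hshift (c + 1) rfl, ih (s + 1) (c + 1) (by omega) (by omega)]
      have hhead : ((s + ((0 : Nat) : Int), H ((wkListAux (true :: rest) c).getD 0 none)) : Int × Option Int)
          = (s, PySem.List.pyGetD wk c none) := by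
        have : c < (wk.length : Int) := by omega
        simp [wkListAux, hsome c hc this]
      rw [hhead]
      simp [convListAux]

-- ===== VERDICT (by name: the statement is the Claim_ definition above) =====
theorem get_overall_to_weekly_mask_conversion_dict_spec : Claim_equal_get_overall_to_weekly_mask_conversion_dict := by
  intro nan_mask weekly_mask _ hpre
  unfold Spec_get_overall_to_weekly_mask_conversion_dict
  unfold Pre_get_overall_to_weekly_mask_conversion_dict at hpre
  simp only [get_overall_to_weekly_mask_conversion_dict, get_overall_to_weekly_mask_conversion_dict_alt]
  set od : PySem.Dict Int (Option Int) := ((PySem.List.enumerate nan_mask 0).foldl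
      (fun (p : PySem.Dict Int (Option Int) × Int) ib =>
        if ib.2 then (p.1.insert ib.1 (some p.2), p.2 + 1) else (p.1.insert ib.1 none, p.2))
      (PySem.Dict.empty, 0)).1 with hod
  set wd : PySem.Dict (Option Int) (Option Int) := ((PySem.List.enumerate weekly_mask 0).foldl
      (fun (p : PySem.Dict (Option Int) (Option Int) × Int) ib =>
        if ib.2 then (p.1.insert (some ib.1) (some p.2), p.2 + 1) else (p.1.insert (some ib.1) none, p.2))
      ((PySem.Dict.empty).insert none none, 0)).1 with hwd
  -- B side
  rw [wkfold, List.nil_append]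
  rw [bfold (wkListAux weekly_mask 0) nan_mask 0 0 PySem.Dict.empty
        (fun j _ => PySem.Dict.contains_empty j)]
  rw [show (PySem.Dict.empty : PySem.Dict Int (Option Int)).items = [] from rfl, List.nil_append]
  -- A side: the conversion loop is a fold of inserts over fresh distinct keys
  rw [PySem.Dict.items_foldl_insert_fresh (PySem.List.pyRange 0 (nan_mask.length : Int) 1)
        (fun i => i) (fun i => wd.getD (od.getD i none) none) PySem.Dict.empty
        (fun a _ => PySem.Dict.contains_empty a)
        (by simpa using PySem.List.nodup_pyRange_one 0 (nan_mask.length : Int))]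
  rw [show (PySem.Dict.empty : PySem.Dict Int (Option Int)).items = [] from rfl, List.nil_append]
  rw [PySem.List.pyRange_zero_natCast, List.map_map]
  have hmain := mapRange_eq_conv (wkListAux weekly_mask 0) (fun v => wd.getD v none)
      (by
        show wd.getD none none = none
        rw [hwd, wfold_getD_none]
        exact PySem.Dict.getD_insert_self _ _ _ _)
      (by
        intro t ht0 htlt
        rw [wkListAux_length] at htlt
        show wd.getD (some t) none = _
        rw [hwd, wfold_getD_some, if_pos (by constructor <;> omega)]
        have ht : t = ((t.toNat : Nat) : Int) := by omega
        conv_rhs => rw [ht, PySem.List.pyGetD_natCast]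
        have h1 : (t - 0).toNat = t.toNat := by omega
        rw [h1])
      nan_mask 0 0 (le_refl 0) (by rw [wkListAux_length]; omega)
  rw [← hmain]
  apply List.map_congr_left
  intro k hk
  rw [List.mem_range] at hk
  simp only [Function.comp_apply, zero_add]
  refine congrArg₂ Prod.mk rfl ?_
  show wd.getD (od.getD ((k : Int)) none) none
      = wd.getD ((wkListAux nan_mask 0).getD k none) none
  rw [hod, ofold_getD, if_pos (by omega)]
  have hT : (((k : Int)) - 0).toNat = k := by omega
  rw [hT]
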